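-- pv_equiv track=rewrite | github.com/LeDinhNguyen/Python | Exam/Assigment1/SE183969/Q4.py | checkTemporaryPrime
-- ===== SOURCE A (Python) =====
-- def isPrime(n: int) -> bool:
--     count = 0
--     if n == 0 or n == 1:
--         return False
--     elif n == 2:
--         return True
--     else:
--         for i in range(2, n):
--             if n % i == 0:
--                 count += 1
--     return count == 0
--
-- def checkTemporaryPrime(n: int) -> int:
--     '''
--
--     :param n: int
--     :return:
--         1 - if n is temporary prime number
--         0 - if n is not temporary prime number
--     '''
--     prime_divisors = 0
--     all_divisors = 0
--     for i in range(2, n):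
--         if n % i == 0:
--             all_divisors += 1
--             if isPrime(i):
--                 prime_divisors += 1
--     if prime_divisors == all_divisors:
--         return 1
--     else:
--         return 0
-- ===== SOURCE B (Python) =====
-- def _is_prime(m: int) -> bool:
--     if m < 2:
--         return False
--     d = 2
--     while d * d <= m:
--         if m % d == 0:
--             return False
--         d += 1
--     return True
--
-- def checkTemporaryPrime(n: int) -> int:
--     # n is "temporary prime" iff every proper divisor in [2, n) is prime,
--     # i.e. n < 4, or n is prime, or n = p*q for primes p, q (incl. p == q).
--     if n < 4:
--         return 1
--     d = 2
--     while d * d <= n: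
--         if n % d == 0:
--             # d is the smallest (hence prime) factor; check the cofactor
--             return 1 if _is_prime(n // d) else 0
--         d += 1
--     return 1  # n is prime: no proper divisors at all
-- ===== Notes on version B (the rewrite author's own statement) =====
-- stated objective: faster
-- what changed: B replaces A's full scan of 2..n-1 (with a linear primality test per divisor) by trial division up to sqrt(n): n passes iff n < 4, n is prime, or its cofactor n/d by its smallest factor d is prime.
import Mathlib
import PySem

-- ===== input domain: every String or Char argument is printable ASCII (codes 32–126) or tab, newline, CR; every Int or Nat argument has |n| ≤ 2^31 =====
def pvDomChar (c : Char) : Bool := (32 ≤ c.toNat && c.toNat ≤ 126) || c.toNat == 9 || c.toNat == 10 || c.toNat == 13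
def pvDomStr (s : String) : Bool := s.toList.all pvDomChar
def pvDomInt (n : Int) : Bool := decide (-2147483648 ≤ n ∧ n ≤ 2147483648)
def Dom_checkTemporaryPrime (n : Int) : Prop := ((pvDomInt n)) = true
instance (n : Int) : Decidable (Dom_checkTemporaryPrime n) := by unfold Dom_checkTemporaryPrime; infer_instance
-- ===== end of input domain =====

-- B replaces A's full scan of 2..n-1 by sqrt(n) trial division (asymptotically faster); return values agree everywhere.

-- ===== PORT A =====
def isPrimeA (n : Int) : Bool :=
  if n = 0 ∨ n = 1 then false
  else if n = 2 then true
  else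
    ((PySem.List.pyRange 2 n 1).foldl
      (fun c i => if PySem.Int.mod n i = 0 then c + 1 else c) (0 : Int)) = 0

def checkTemporaryPrime (n : Int) : Int :=
  let s := (PySem.List.pyRange 2 n 1).foldl
    (fun (s : Int × Int) i =>
      if PySem.Int.mod n i = 0 then
        (if isPrimeA i then (s.1 + 1, s.2 + 1) else (s.1, s.2 + 1))
      else s) ((0 : Int), (0 : Int))
  if s.1 = s.2 then 1 else 0

-- ===== PORT B =====
-- while d*d <= n: first divisor found, else none (termination: d grows, bounded by n)
def bTrialDiv (n : Int) (d : Nat) : Option Nat :=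
  if h : (d : Int) * d ≤ n then
    (if PySem.Int.mod n d = 0 then some d else bTrialDiv n (d + 1))
  else none
  termination_by n.toNat + 1 - d
  decreasing_by
    have hdd : (d : Nat) ≤ d * d := by nlinarith
    have h2 : (d : Int) ≤ n := le_trans (by exact_mod_cast hdd) h
    omega

def isPrimeB (m : Int) : Bool :=
  if m < 2 then false else (bTrialDiv m 2).isNone

def checkTemporaryPrime_alt (n : Int) : Int :=
  if n < 4 then 1
  else
    match bTrialDiv n 2 with
    | some d => if isPrimeB (PySem.Int.floordiv n (d : Int)) then 1 else 0
    | none => 1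

-- ===== PRECONDITION & SPEC =====
def Spec_checkTemporaryPrime (n : Int) (out : Int) : Prop := out = checkTemporaryPrime_alt n
instance (n : Int) (out : Int) : Decidable (Spec_checkTemporaryPrime n out) := by unfold Spec_checkTemporaryPrime; infer_instance

-- ===== CLAIM (what is proved, stated in full; the proofs are below) =====
def Claim_equal_checkTemporaryPrime : Prop := ∀ (n : Int), Dom_checkTemporaryPrime n → Spec_checkTemporaryPrime n (checkTemporaryPrime n)

-- ===== LEMMAS AND PROOFS =====

-- "every proper divisor in [2,n) passes isPrimeA": the common characterisation
def PropA (n : Int) : Prop := ∀ i : Int, 2 ≤ i → i < n → i ∣ n → isPrimeA i = true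

-- counting folds compute List.countP
theorem foldl_count_int {P : Int → Prop} [DecidablePred P] (l : List Int) (c : Int) :
    l.foldl (fun c i => if P i then c + 1 else c) c
      = c + ((l.countP fun i => decide (P i) : Nat) : Int) := by
  induction l generalizing c with
  | nil => simp
  | cons a t ih =>
    simp only [List.foldl_cons, List.countP_cons]
    by_cases hP : P a
    · simp only [ih, hP, decide_true, if_pos]
      push_cast; ring
    · simp [hP, ih]

theorem pairfold (n : Int) (l : List Int) (a b : Int) :
    l.foldl (fun (s : Int × Int) i =>
      if PySem.Int.mod n i = 0 then
        (if isPrimeA i then (s.1 + 1, s.2 + 1) else (s.1, s.2 + 1))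
      else s) (a, b)
    = (a + ((l.countP fun i => decide (PySem.Int.mod n i = 0) && isPrimeA i : Nat) : Int),
       b + ((l.countP fun i => decide (PySem.Int.mod n i = 0) : Nat) : Int)) := by
  induction l generalizing a b with
  | nil => simp
  | cons x t ih =>
    simp only [List.foldl_cons, List.countP_cons]
    by_cases h1 : PySem.Int.mod n x = 0
    · by_cases h2 : isPrimeA x = true
      · simp only [h2, if_pos, ih, h1, decide_true, Bool.and_true, if_true, Prod.mk.injEq]
        constructor <;> (push_cast; ring)
      · simp only [h2, ih, h1, decide_true, Bool.and_false, Bool.false_eq_true, if_false,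
          if_true, Prod.mk.injEq]
        constructor <;> (push_cast; ring)
    · simp [h1, ih]

theorem countP_and_eq_iff (l : List Int) (q r : Int → Bool) :
    l.countP (fun i => q i && r i) = l.countP q ↔ ∀ i ∈ l, q i = true → r i = true := by
  induction l with
  | nil => simp
  | cons a t ih =>
    have hle : t.countP (fun i => q i && r i) ≤ t.countP q :=
      List.countP_mono_left (fun x _ hx => by
        simp only [Bool.and_eq_true] at hx; exact hx.1)
    simp only [List.countP_cons, List.mem_cons]
    by_cases hq : q a = true
    · by_cases hr : r a = true
      · simp only [hq, hr, Bool.and_self, if_pos]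
        rw [show (t.countP (fun i => q i && r i) + 1 = t.countP q + 1)
            ↔ (t.countP (fun i => q i && r i) = t.countP q) from by omega, ih]
        constructor
        · intro h i hi; rcases hi with rfl | hi
          · intro _; exact hr
          · exact h i hi
        · intro h i hi; exact h i (Or.inr hi)
      · simp only [hq, hr, Bool.and_false, Bool.false_eq_true, if_false, add_zero]
        constructor
        · intro h; exact absurd h (Nat.ne_of_lt (Nat.lt_succ_of_le hle))
        · intro h; exact absurd (h a (Or.inl rfl) hq) (by simp [hr])
    · simp only [hq, Bool.false_and, Bool.false_eq_true, if_false, add_zero, ih]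
      constructor
      · intro h i hi; rcases hi with rfl | hi
        · intro hqa; exact absurd hqa hq
        · exact h i hi
      · intro h i hi; exact h i (Or.inr hi)

-- trial-division counting in [2, i) characterises primality of i.toNat
theorem no_middle_dvd_iff_prime (i : Int) (h3 : 2 ≤ i) :
    (∀ j : Int, 2 ≤ j → j < i → ¬ j ∣ i) ↔ Nat.Prime i.toNat := by
  have hi : ((i.toNat : Nat) : Int) = i := Int.toNat_of_nonneg (by omega)
  constructor
  · intro h
    rw [Nat.prime_def_lt]
    refine ⟨by omega, fun m hm hdvd => ?_⟩
    by_contra hm1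
    have hm0 : m ≠ 0 := by rintro rfl; simp at hdvd; omega
    have hm2 : 2 ≤ m := by omega
    refine h (m : Int) (by exact_mod_cast hm2) (by omega) ?_
    rw [← hi]; exact_mod_cast hdvd
  · intro hp j hj2 hji hdvd
    have hjd : j.toNat ∣ i.toNat := by
      rw [← Int.natCast_dvd_natCast, Int.toNat_of_nonneg (by omega : (0:Int) ≤ j), hi]
      exact hdvd
    have := (Nat.prime_def_lt.mp hp).2 j.toNat (by omega) hjd
    omega

theorem isPrimeA_iff (i : Int) (h2 : 2 ≤ i) : isPrimeA i = true ↔ Nat.Prime i.toNat := by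
  by_cases hi2 : i = 2
  · subst hi2; norm_num [isPrimeA]; decide
  · unfold isPrimeA
    rw [if_neg (by omega), if_neg hi2, decide_eq_true_iff,
      foldl_count_int (P := fun j => PySem.Int.mod i j = 0)]
    rw [zero_add, Nat.cast_eq_zero, List.countP_eq_zero]
    rw [← no_middle_dvd_iff_prime i h2]
    constructor
    · intro h j hj2 hji hdvd
      have := h j (by rw [PySem.List.mem_pyRange_one]; exact ⟨hj2, hji⟩)
      simp only [decide_eq_true_iff] at this
      exact this ((PySem.Int.mod_eq_zero_iff_dvd i j).mpr hdvd)
    · intro h j hj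
      rw [PySem.List.mem_pyRange_one] at hj
      simp only [decide_eq_true_iff, PySem.Int.mod_eq_zero_iff_dvd]
      exact h j hj.1 hj.2

theorem A_eq_one_iff (n : Int) : checkTemporaryPrime n = 1 ↔ PropA n := by
  unfold checkTemporaryPrime
  rw [pairfold, zero_add, zero_add]
  simp only []
  rw [show ∀ a b : Int, ((if a = b then (1:Int) else 0) = 1 ↔ a = b) from by
    intro a b; split_ifs with h <;> simp [h]]
  rw [Nat.cast_inj, countP_and_eq_iff]
  unfold PropA
  constructor
  · intro h i hi2 hin hdvd
    exact h i (by rw [PySem.List.mem_pyRange_one]; exact ⟨hi2, hin⟩)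
      (by simp [PySem.Int.mod_eq_zero_iff_dvd, hdvd])
  · intro h i hi hq
    rw [PySem.List.mem_pyRange_one] at hi
    simp only [decide_eq_true_iff, PySem.Int.mod_eq_zero_iff_dvd] at hq
    exact h i hi.1 hi.2 hq

theorem A_zero_or_one (n : Int) : checkTemporaryPrime n = 0 ∨ checkTemporaryPrime n = 1 := by
  have key : ∀ (x : Int × Int), (if x.1 = x.2 then (1:Int) else 0) = 0 ∨
      (if x.1 = x.2 then (1:Int) else 0) = 1 := by
    intro x; split_ifs <;> simp
  exact key _

-- characterisations of B's trial-division loop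
theorem bTrialDiv_none_iff (n : Int) (d : Nat) :
    bTrialDiv n d = none ↔ ∀ e : Nat, d ≤ e → (e : Int) * e ≤ n → ¬ (e : Int) ∣ n := by
  fun_induction bTrialDiv n d with
  | case1 d h hmod =>
    simp only [reduceCtorEq, false_iff, not_forall]
    exact ⟨d, le_refl d, h, by
      simp only [Classical.not_imp, Decidable.not_not]
      exact (PySem.Int.mod_eq_zero_iff_dvd n d).mp hmod⟩
  | case2 d h hmod ih =>
    rw [ih]
    constructor
    · intro hall e hde he
      rcases Nat.eq_or_lt_of_le hde with rfl | hlt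
      · rw [← PySem.Int.mod_eq_zero_iff_dvd]; exact hmod
      · exact hall e hlt he
    · intro hall e hde he; exact hall e (by omega) he
  | case3 d h =>
    simp only [true_iff]
    intro e hde he
    exfalso
    have : (d : Int) * d ≤ (e : Int) * e := by
      have : (d : Nat) * d ≤ e * e := Nat.mul_le_mul hde hde
      exact_mod_cast this
    exact h (le_trans this he)

theorem bTrialDiv_some (n : Int) (d : Nat) : ∀ e : Nat, bTrialDiv n d = some e →
    d ≤ e ∧ (e : Int) * e ≤ n ∧ (e : Int) ∣ n ∧
      ∀ f : Nat, d ≤ f → f < e → ¬ (f : Int) ∣ n := by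
  fun_induction bTrialDiv n d with
  | case1 d hle hmod =>
    intro e h
    obtain rfl : d = e := by simpa using h
    exact ⟨le_refl d, hle, (PySem.Int.mod_eq_zero_iff_dvd n d).mp hmod, fun f h1 h2 _ => by omega⟩
  | case2 d hle hmod ih =>
    intro e h
    obtain ⟨h1, h2, h3, h4⟩ := ih e h
    refine ⟨by omega, h2, h3, fun f hf1 hf2 hfd => ?_⟩
    rcases Nat.eq_or_lt_of_le hf1 with rfl | hlt
    · exact hmod ((PySem.Int.mod_eq_zero_iff_dvd n d).mpr hfd)
    · exact h4 f hlt hf2 hfd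
  | case3 d hle => intro e h; simp at h

theorem sqrt_test_iff (M : Nat) (hM : 2 ≤ M) :
    (∀ e : Nat, 2 ≤ e → e * e ≤ M → ¬ e ∣ M) ↔ Nat.Prime M := by
  constructor
  · intro h
    by_contra hp
    have hpm := Nat.minFac_prime (by omega : M ≠ 1)
    have hsq : M.minFac * M.minFac ≤ M := by
      have := Nat.minFac_sq_le_self (by omega) hp
      nlinarith [this]
    exact h M.minFac hpm.two_le hsq (Nat.minFac_dvd M)
  · intro hp e he2 hsq hdvd
    have heM : e < M := by nlinarith
    have := (Nat.prime_def_lt.mp hp).2 e heM hdvd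
    omega

theorem isPrimeB_iff (m : Int) : isPrimeB m = true ↔ 2 ≤ m ∧ Nat.Prime m.toNat := by
  unfold isPrimeB
  split_ifs with hm
  · simp only [Bool.false_eq_true, false_iff]; rintro ⟨h, _⟩; omega
  · have hm2 : 2 ≤ m := by omega
    have hmc : ((m.toNat : Nat) : Int) = m := Int.toNat_of_nonneg (by omega)
    rw [Option.isNone_iff_eq_none, bTrialDiv_none_iff]
    rw [iff_true_intro hm2, true_and]
    rw [← sqrt_test_iff m.toNat (by omega)]
    constructor
    · intro h e he2 hsq hdvd
      refine h e (he2) ?_ ?_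
      · rw [← hmc]; exact_mod_cast hsq
      · rw [← hmc]; exact_mod_cast hdvd
    · intro h e he2 hsq hdvd
      refine h e he2 ?_ ?_
      · rw [← hmc] at hsq; exact_mod_cast hsq
      · rw [← hmc] at hdvd; exact_mod_cast hdvd

theorem dvd_mul_prime_prime {p q k : Nat} (hp : p.Prime) (hq : q.Prime) (hk : k ∣ p * q) :
    k = 1 ∨ k = p ∨ k = q ∨ k = p * q := by
  by_cases hpk : p ∣ k
  · obtain ⟨j, rfl⟩ := hpk
    have hj : j ∣ q := (mul_dvd_mul_iff_left (by exact_mod_cast hp.pos.ne' : p ≠ 0)).mp hk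
    rcases hq.eq_one_or_self_of_dvd j hj with rfl | rfl
    · right; left; simp
    · right; right; right; rfl
  · have hkq : k ∣ q :=
      Nat.Coprime.dvd_of_dvd_mul_left ((hp.coprime_iff_not_dvd.mpr hpk).symm) hk
    rcases hq.eq_one_or_self_of_dvd k hkq with rfl | rfl
    · left; rfl
    · right; right; left; rfl

theorem PropA_small (n : Int) (h : n < 4) : PropA n := by
  intro i h2 hin hdvd
  exfalso
  have hi2 : i = 2 := by omega
  have hn3 : n = 3 := by omega
  subst hi2 hn3
  obtain ⟨k, hk⟩ := hdvd
  omega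

theorem B_eq_one_iff (n : Int) : checkTemporaryPrime_alt n = 1 ↔ PropA n := by
  unfold checkTemporaryPrime_alt
  split_ifs with h4
  · simp only [true_iff]; exact PropA_small n h4
  · have hn4 : 4 ≤ n := by omega
    have hmc : ((n.toNat : Nat) : Int) = n := Int.toNat_of_nonneg (by omega)
    cases heq : bTrialDiv n 2 with
    | none =>
      simp only [true_iff]
      rw [bTrialDiv_none_iff] at heq
      have hprime : Nat.Prime n.toNat := by
        rw [← sqrt_test_iff n.toNat (by omega)]
        intro e he2 hsq hdvd
        refine heq e he2 ?_ ?_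
        · rw [← hmc]; exact_mod_cast hsq
        · rw [← hmc]; exact_mod_cast hdvd
      intro i h2 hin hdvd
      exfalso
      have hkd : i.toNat ∣ n.toNat := by
        have : ((i.toNat : Nat) : Int) ∣ ((n.toNat : Nat) : Int) := by
          rw [hmc, Int.toNat_of_nonneg (by omega : (0:Int) ≤ i)]; exact hdvd
        exact_mod_cast this
      have := (Nat.prime_def_lt.mp hprime).2 i.toNat (by omega) hkd
      omega
    | some d =>
      obtain ⟨hd2, hdsq, hddvd, hmin⟩ := bTrialDiv_some n 2 d heq
      -- d is the least factor ≥ 2, hence prime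
      have hdp : Nat.Prime d := by
        by_contra hnp
        obtain ⟨e, hed, he2, hlt⟩ := Nat.exists_dvd_of_not_prime2 hd2 hnp
        have : (e : Int) ∣ n := dvd_trans (by exact_mod_cast hed) hddvd
        exact hmin e he2 hlt this
      -- the cofactor
      have hdN : d ∣ n.toNat := by
        have : ((d : Nat) : Int) ∣ ((n.toNat : Nat) : Int) := by rw [hmc]; exact hddvd
        exact_mod_cast this
      set Q : Nat := n.toNat / d with hQdef
      have hNQ : n.toNat = d * Q := (Nat.div_mul_cancel hdN).symm.trans (by ring)
      have hfd : PySem.Int.floordiv n (d : Int) = (Q : Int) := by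
        rw [← hmc, PySem.Int.floordiv_natCast]
      have hdsqN : d * d ≤ n.toNat := by
        have : ((d * d : Nat) : Int) ≤ ((n.toNat : Nat) : Int) := by rw [hmc]; exact_mod_cast hdsq
        exact_mod_cast this
      have hdQ : d ≤ Q := by
        by_contra hc
        push_neg at hc
        have : d * Q < d * d := by nlinarith
        omega
      have hQ2 : 2 ≤ Q := by omega
      have hQN : Q < n.toNat := by
        rw [hQdef]
        exact Nat.div_lt_self (by omega) (by omega)
      show (if isPrimeB (PySem.Int.floordiv n (d : Int)) = true then (1:Int) else 0) = 1 ↔ PropA n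
      rw [hfd]
      split_ifs with hB
      · -- cofactor prime: n = d*Q with both prime, so every proper divisor is d or Q
        rw [isPrimeB_iff] at hB
        have hQp : Nat.Prime Q := by
          have := hB.2; rwa [Int.toNat_natCast] at this
        simp only [true_iff]
        intro i h2 hin hdvd
        have hkd : i.toNat ∣ n.toNat := by
          have : ((i.toNat : Nat) : Int) ∣ ((n.toNat : Nat) : Int) := by
            rw [hmc, Int.toNat_of_nonneg (by omega : (0:Int) ≤ i)]; exact hdvd
          exact_mod_cast this
        rw [hNQ] at hkd
        have hic : ((i.toNat : Nat) : Int) = i := Int.toNat_of_nonneg (by omega)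
        rcases dvd_mul_prime_prime hdp hQp hkd with h1 | h1 | h1 | h1
        · omega
        · rw [isPrimeA_iff i h2, h1]; exact hdp
        · rw [isPrimeA_iff i h2, h1]; exact hQp
        · rw [← hNQ] at h1; omega
      · -- cofactor composite: Q itself is a non-prime proper divisor
        rw [isPrimeB_iff] at hB
        push_neg at hB
        have hQnp : ¬ Nat.Prime Q := by
          intro hc
          exact absurd (by rwa [Int.toNat_natCast]) (hB (by exact_mod_cast hQ2))
        refine iff_of_false (by norm_num) ?_
        intro hPA
        have hQdvd : (Q : Int) ∣ n := by
          rw [← hmc]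
          exact_mod_cast (Dvd.intro d (by rw [hNQ]; ring) : Q ∣ n.toNat)
        have := hPA (Q : Int) (by exact_mod_cast hQ2) (by omega) hQdvd
        rw [isPrimeA_iff _ (by exact_mod_cast hQ2), Int.toNat_natCast] at this
        exact hQnp this

theorem B_zero_or_one (n : Int) : checkTemporaryPrime_alt n = 0 ∨ checkTemporaryPrime_alt n = 1 := by
  unfold checkTemporaryPrime_alt
  split_ifs with h
  · right; rfl
  · cases bTrialDiv n 2 <;> simp <;> split_ifs <;> simp

-- ===== VERDICT (by name: the statement is the Claim_ definition above) =====
theorem checkTemporaryPrime_spec : Claim_equal_checkTemporaryPrime := by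
  intro n _
  unfold Spec_checkTemporaryPrime
  have h := (A_eq_one_iff n).trans (B_eq_one_iff n).symm
  rcases A_zero_or_one n with hA | hA <;> rcases B_zero_or_one n with hB | hB <;> rw [hA, hB]
  · exact absurd (h.mpr hB) (by omega)
  · exact absurd (h.mp hA) (by omega)
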